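-- pv_equiv track=rewrite | github.com/jpbascur/SciMacro-noGUI | My_Module/merging.py | __clean_Con_Dict
-- ===== SOURCE A (Python) =====
-- def __clean_Con_Dict(con_dict, clu_dict):
--     clean_con_dict = {}
--     for c_1 in list(clu_dict):
--         clean_con_dict[c_1] = {}
--         for c_2 in list(clu_dict):
--             if c_1 != c_2:
--                 if c_2 in con_dict[c_1]:
--                     clean_con_dict[c_1][c_2] = con_dict[c_1][c_2]
--                 else:
--                     clean_con_dict[c_1][c_2] = 0
--     return clean_con_dict
-- ===== SOURCE B (Python) =====
-- def __clean_Con_Dict(con_dict, clu_dict):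
--     def _row(c_1):
--         row = {c_2: 0 for c_2 in clu_dict if c_2 != c_1}
--         if row:
--             for c_2, v in con_dict[c_1].items():
--                 if c_2 in row:
--                     row[c_2] = v
--         return row
--     return {c_1: _row(c_1) for c_1 in clu_dict}
-- ===== Notes on version B (the rewrite author's own statement) =====
-- stated objective: alternative
-- what changed: A fills each row by re-scanning clu_dict with a per-pair 'c_2 in con_dict[c_1]' membership test; B builds a zero-initialized row over the other cluster keys once and overlays con_dict[c_1]'s items onto the keys already present, assembling rows with comprehensions.
import Mathlib
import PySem

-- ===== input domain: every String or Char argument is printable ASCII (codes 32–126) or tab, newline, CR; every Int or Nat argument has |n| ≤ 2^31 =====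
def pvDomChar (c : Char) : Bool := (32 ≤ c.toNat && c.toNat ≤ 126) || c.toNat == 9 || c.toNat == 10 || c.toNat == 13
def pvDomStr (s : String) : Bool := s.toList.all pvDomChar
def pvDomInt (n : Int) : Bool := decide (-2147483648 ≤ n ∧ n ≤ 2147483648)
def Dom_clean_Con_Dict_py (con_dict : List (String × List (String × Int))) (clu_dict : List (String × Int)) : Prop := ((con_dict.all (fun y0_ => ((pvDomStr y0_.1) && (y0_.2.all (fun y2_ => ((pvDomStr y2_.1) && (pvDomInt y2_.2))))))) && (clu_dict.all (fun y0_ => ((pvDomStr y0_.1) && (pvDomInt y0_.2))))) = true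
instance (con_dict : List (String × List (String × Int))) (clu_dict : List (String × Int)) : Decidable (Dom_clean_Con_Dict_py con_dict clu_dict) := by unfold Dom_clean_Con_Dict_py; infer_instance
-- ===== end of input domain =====

-- B replaces A's nested clu×clu membership scan by a zero-initialized row per key
-- overlaid with con_dict[c_1]'s known values (different decomposition; same output).

-- ===== PORT A =====
-- A's nested loops over list(clu_dict) with a per-pair 'c_2 in con_dict[c_1]' test;
-- the mutated inner dict clean_con_dict[c_1] is modelled as the local accumulator 'row'.
def clean_Con_Dict_py (con_dict : List (String × List (String × Int))) (clu_dict : List (String × Int)) : List (String × List (String × Int)) :=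
  let con : PySem.Dict String (PySem.Dict String Int) :=
    PySem.Dict.ofList (con_dict.map (fun p => (p.1, PySem.Dict.ofList p.2)))
  let clu : PySem.Dict String Int := PySem.Dict.ofList clu_dict
  let clean : PySem.Dict String (PySem.Dict String Int) :=
    clu.keys.foldl (fun acc c_1 =>
      let row : PySem.Dict String Int :=
        clu.keys.foldl (fun row c_2 =>
          if c_1 ≠ c_2 then
            -- con_dict[c_1]: Pre_ guarantees presence whenever this branch is reached
            if (con.getD c_1 PySem.Dict.empty).contains c_2 then
              row.insert c_2 ((con.getD c_1 PySem.Dict.empty).getD c_2 0)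
            else
              row.insert c_2 0
          else row) PySem.Dict.empty
      acc.insert c_1 row) PySem.Dict.empty
  clean.items.map (fun p => (p.1, p.2.items))

-- ===== PORT B =====
-- B: per key, a zero row over the other keys (dict comprehension over nodup keys = mk of a map),
-- then, if the row is non-empty, overlay con_dict[c_1].items() onto the keys already present.
def clean_Con_Dict_py_alt (con_dict : List (String × List (String × Int))) (clu_dict : List (String × Int)) : List (String × List (String × Int)) :=
  let con : PySem.Dict String (PySem.Dict String Int) :=
    PySem.Dict.ofList (con_dict.map (fun p => (p.1, PySem.Dict.ofList p.2)))
  let keys := (PySem.Dict.ofList clu_dict : PySem.Dict String Int).keys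
  keys.map (fun c_1 =>
    let row0 : PySem.Dict String Int :=
      PySem.Dict.mk ((keys.filter (fun c_2 => c_2 ≠ c_1)).map (fun c_2 => (c_2, (0 : Int))))
    let row : PySem.Dict String Int :=
      if row0.items.isEmpty then row0
      else (con.getD c_1 PySem.Dict.empty).items.foldl
             (fun r p => if r.contains p.1 then r.insert p.1 p.2 else r) row0
    (c_1, row.items))

-- ===== PRECONDITION & SPEC =====
-- Pre_ excludes exactly the inputs where Python A raises KeyError (con_dict[c_1] for a clu key
-- missing from con_dict, reached as soon as clu_dict has at least two distinct keys).
def Pre_clean_Con_Dict_py (con_dict : List (String × List (String × Int))) (clu_dict : List (String × Int)) : Prop :=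
  (PySem.Set.ofList (clu_dict.map (·.1))).length ≤ 1 ∨
    ∀ p ∈ clu_dict, p.1 ∈ con_dict.map (·.1)
instance (con_dict : List (String × List (String × Int))) (clu_dict : List (String × Int)) : Decidable (Pre_clean_Con_Dict_py con_dict clu_dict) := by unfold Pre_clean_Con_Dict_py; infer_instance
def pvWitness_clean_Con_Dict_py : (List (String × List (String × Int))) × (List (String × Int)) :=
  ([("a", [("b", 3), ("z", 7)]), ("b", [])], [("a", 1), ("b", 2)])
def Spec_clean_Con_Dict_py (con_dict : List (String × List (String × Int))) (clu_dict : List (String × Int)) (out : List (String × List (String × Int))) : Prop := out = clean_Con_Dict_py_alt con_dict clu_dict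
instance (con_dict : List (String × List (String × Int))) (clu_dict : List (String × Int)) (out : List (String × List (String × Int))) : Decidable (Spec_clean_Con_Dict_py con_dict clu_dict out) := by unfold Spec_clean_Con_Dict_py; infer_instance

-- ===== CLAIM (what is proved, stated in full; the proofs are below) =====
def Claim_equal_clean_Con_Dict_py : Prop := ∀ (con_dict : List (String × List (String × Int))) (clu_dict : List (String × Int)), Dom_clean_Con_Dict_py con_dict clu_dict → Pre_clean_Con_Dict_py con_dict clu_dict → Spec_clean_Con_Dict_py con_dict clu_dict (clean_Con_Dict_py con_dict clu_dict)

-- ===== LEMMAS AND PROOFS =====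

-- the overlay loop never changes the key list
theorem pv_overlay_keys (P : List (String × Int)) :
    ∀ (d : PySem.Dict String Int),
      (P.foldl (fun r p => if r.contains p.1 then r.insert p.1 p.2 else r) d).keys = d.keys := by
  induction P with
  | nil => intro d; rfl
  | cons p rest ih =>
    intro d
    simp only [List.foldl_cons]
    by_cases h : d.contains p.1
    · rw [if_pos h, ih, PySem.Dict.keys_insert_of_contains _ _ h]
    · rw [if_neg h, ih]

-- the overlay loop's lookups: present keys take the (first) P-value, others keep d's
theorem pv_overlay_getD (P : List (String × Int)) (hP : (P.map (·.1)).Nodup) :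
    ∀ (d : PySem.Dict String Int) (k : String),
      (P.foldl (fun r p => if r.contains p.1 then r.insert p.1 p.2 else r) d).getD k 0
        = if d.contains k then ((PySem.Dict.mk P).get? k).getD (d.getD k 0) else d.getD k 0 := by
  induction P with
  | nil =>
    intro d k
    simp [PySem.Dict.get?]
  | cons p rest ih =>
    intro d k
    simp only [List.map_cons, List.nodup_cons] at hP
    simp only [List.foldl_cons]
    by_cases hpk : p.1 = k
    · subst hpk
      by_cases hc : d.contains p.1
      · rw [if_pos hc, ih hP.2]
        have hrest : (PySem.Dict.mk rest).get? p.1 = none := by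
          rw [PySem.Dict.get?_eq_none_iff_not_mem_keys]
          simpa [PySem.Dict.keys] using hP.1
        rw [PySem.Dict.contains_insert_self, if_pos hc,
          PySem.Dict.get?_mk_cons, if_pos (by simp), hrest]
        simp [PySem.Dict.getD_insert_self]
      · rw [if_neg hc, ih hP.2, if_neg hc, if_neg hc]
    · have hbeq : (p.1 == k) = false := by simp [hpk]
      by_cases hc : d.contains p.1
      · rw [if_pos hc, ih hP.2, PySem.Dict.get?_mk_cons, hbeq]
        have h1 : (d.insert p.1 p.2).contains k = d.contains k := by
          rw [PySem.Dict.contains_insert]; simp [Ne.symm hpk]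
        have h2 : (d.insert p.1 p.2).getD k 0 = d.getD k 0 :=
          PySem.Dict.getD_insert_of_ne _ _ _ (Ne.symm hpk)
        rw [h1, h2]
        simp
      · rw [if_neg hc, ih hP.2, PySem.Dict.get?_mk_cons, hbeq]
        simp

-- the two row computations agree for every outer key c₁ and every connection row cr
theorem pv_row_eq (keys : List String) (hk : keys.Nodup) (c1 : String)
    (cr : PySem.Dict String Int) (hcr : cr.keys.Nodup) :
    (keys.foldl (fun row c_2 =>
        if c1 ≠ c_2 then
          if cr.contains c_2 then row.insert c_2 (cr.getD c_2 0) else row.insert c_2 0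
        else row) PySem.Dict.empty)
      = (let row0 : PySem.Dict String Int :=
          PySem.Dict.mk ((keys.filter (fun c_2 => c_2 ≠ c1)).map (fun c_2 => (c_2, (0 : Int))))
        if row0.items.isEmpty then row0
        else cr.items.foldl (fun r p => if r.contains p.1 then r.insert p.1 p.2 else r) row0) := by
  have hfe : (fun c_2 => decide (c1 ≠ c_2)) = (fun c_2 : String => decide (c_2 ≠ c1)) := by
    funext x; simp [ne_comm]
  obtain ⟨F, hF⟩ : ∃ F, keys.filter (fun c_2 => c_2 ≠ c1) = F := ⟨_, rfl⟩
  have hFnd : F.Nodup := hF ▸ hk.filter _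
  -- A's row, via filter + fresh inserts
  have hA : (keys.foldl (fun row c_2 =>
        if c1 ≠ c_2 then
          if cr.contains c_2 then row.insert c_2 (cr.getD c_2 0) else row.insert c_2 0
        else row) PySem.Dict.empty)
      = F.foldl (fun row c_2 =>
          row.insert c_2 (if cr.contains c_2 then cr.getD c_2 0 else 0)) PySem.Dict.empty := by
    rw [← hF, ← hfe, List.foldl_filter]
    apply PySem.List.foldl_congr_mem  -- pointwise equal step functions
    intro row c_2 _
    by_cases h1 : c1 ≠ c_2
    · by_cases h2 : cr.contains c_2 <;> simp [h1, h2]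
    · simp [h1]
  have hAitems : (F.foldl (fun row c_2 =>
        row.insert c_2 (if cr.contains c_2 then cr.getD c_2 0 else 0)) PySem.Dict.empty).items
      = F.map (fun c_2 => (c_2, if cr.contains c_2 then cr.getD c_2 0 else 0)) := by
    have := PySem.Dict.items_foldl_insert_fresh (l := F) (k := fun c_2 => c_2)
      (v := fun c_2 => if cr.contains c_2 then cr.getD c_2 0 else 0)
      (d := PySem.Dict.empty) (by intro a _; rfl) (by simpa using hFnd)
    simpa using this
  rw [hA, hF]
  by_cases hFnil : F = []
  · subst hFnil
    simp
    rfl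
  · -- non-empty row: overlay path
    have hrow0 : (PySem.Dict.mk (F.map (fun c_2 => (c_2, (0 : Int))))).items
        = F.map (fun c_2 => (c_2, (0 : Int))) := rfl
    simp only []
    rw [if_neg (by simp [hFnil])]
    -- both sides have key list F and agree on getD at every k ∈ F
    apply PySem.Dict.ext
    have hkeysA : (F.foldl (fun row c_2 =>
        row.insert c_2 (if cr.contains c_2 then cr.getD c_2 0 else 0)) PySem.Dict.empty).keys = F := by
      simp [PySem.Dict.keys, hAitems, Function.comp_def]
    have hkeysB : (cr.items.foldl (fun r p => if r.contains p.1 then r.insert p.1 p.2 else r)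
        (PySem.Dict.mk (F.map (fun c_2 => (c_2, (0 : Int)))))).keys = F := by
      rw [pv_overlay_keys]
      simp [PySem.Dict.keys, Function.comp_def]
    rw [PySem.Dict.items_eq_map_keys _ (by rw [hkeysA]; exact hFnd) 0,
        PySem.Dict.items_eq_map_keys _ (by rw [hkeysB]; exact hFnd) 0, hkeysA, hkeysB]
    apply List.map_congr_left
    intro k hkF
    have hnd0 : (PySem.Dict.mk (F.map (fun c_2 => (c_2, (0 : Int))))).keys.Nodup := by
      simpa [PySem.Dict.keys, Function.comp_def] using hFnd
    have hmem0 : (k, (0 : Int)) ∈ (PySem.Dict.mk (F.map (fun c_2 => (c_2, (0 : Int))))).items := by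
      simpa using List.mem_map_of_mem (f := fun c_2 => (c_2, (0 : Int))) hkF
    have hval : ∀ dflt : Int, (PySem.Dict.mk (F.map (fun c_2 => (c_2, (0 : Int))))).getD k dflt = 0 := by
      intro dflt
      exact PySem.Dict.getD_of_mem_items _ hmem0 hnd0 dflt
    have hcont : (PySem.Dict.mk (F.map (fun c_2 => (c_2, (0 : Int))))).contains k := by
      rw [PySem.Dict.contains_iff_mem_keys]
      simpa [PySem.Dict.keys, Function.comp_def] using hkF
    have hcrP : (cr.items.map (·.1)).Nodup := hcr
    have hB := pv_overlay_getD cr.items hcrP (PySem.Dict.mk (F.map (fun c_2 => (c_2, (0 : Int))))) k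
    have hmk : (PySem.Dict.mk cr.items) = cr := rfl
    rw [hmk] at hB
    have hAval : (F.foldl (fun row c_2 =>
        row.insert c_2 (if cr.contains c_2 then cr.getD c_2 0 else 0)) PySem.Dict.empty).getD k 0
        = if cr.contains k then cr.getD k 0 else 0 := by
      exact PySem.Dict.getD_of_mem_items _
        (by rw [hAitems]
            simpa using List.mem_map_of_mem
              (f := fun c_2 => (c_2, if cr.contains c_2 then cr.getD c_2 0 else 0)) hkF)
        (by rw [hkeysA]; exact hFnd) 0
    rw [hAval, hB, if_pos hcont, hval]
    rw [PySem.Dict.getD_eq_get?_getD]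
    rw [PySem.Dict.contains_eq_isSome_get?]
    cases cr.get? k <;> simp

-- values of a dict built with update come from the start dict or the pair list
theorem pv_mem_values_update {ν : Type} (ps : List (String × ν)) (w : ν) :
    ∀ (d : PySem.Dict String ν),
      w ∈ (d.update ps).values → w ∈ d.values ∨ w ∈ ps.map (·.2) := by
  induction ps with
  | nil => intro d h; exact Or.inl h
  | cons p rest ih =>
    intro d h
    have hup : d.update (p :: rest) = (d.insert p.1 p.2).update rest := rfl
    rw [hup] at h
    rcases ih _ h with h' | h'
    · rcases PySem.Dict.mem_values_insert _ _ _ _ h' with h'' | h''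
      · exact Or.inr (by simp [h''])
      · exact Or.inl h''
    · exact Or.inr (by simp [h'])

-- every connection row looked up through con has nodup keys
theorem pv_cr_nodup (con_dict : List (String × List (String × Int))) (c1 : String) :
    ((PySem.Dict.ofList (con_dict.map (fun p => (p.1, PySem.Dict.ofList p.2)))
        : PySem.Dict String (PySem.Dict String Int)).getD c1 PySem.Dict.empty).keys.Nodup := by
  rw [PySem.Dict.getD_eq_get?_getD]
  cases hg : (PySem.Dict.ofList (con_dict.map (fun p => (p.1, PySem.Dict.ofList p.2)))
      : PySem.Dict String (PySem.Dict String Int)).get? c1 with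
  | none => simp [PySem.Dict.keys, PySem.Dict.empty]
  | some v =>
    have hv : v ∈ (PySem.Dict.ofList (con_dict.map (fun p => (p.1, PySem.Dict.ofList p.2)))
        : PySem.Dict String (PySem.Dict String Int)).values := by
      have hm := PySem.Dict.mem_items_of_get?_eq_some _ hg
      simpa [PySem.Dict.values] using List.mem_map_of_mem (f := (·.2)) hm
    rcases pv_mem_values_update _ v _ hv with h | h
    · simp [PySem.Dict.values, PySem.Dict.empty] at h
    · simp only [List.map_map, List.mem_map, Function.comp_def] at h
      obtain ⟨p, _, hp⟩ := h
      rw [Option.getD_some, ← hp]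
      exact PySem.Dict.nodup_keys_ofList _

-- ===== VERDICT (by name: the statement is the Claim_ definition above) =====
theorem clean_Con_Dict_py_spec : Claim_equal_clean_Con_Dict_py := by
  intro con_dict clu_dict _ _
  unfold Spec_clean_Con_Dict_py clean_Con_Dict_py clean_Con_Dict_py_alt
  simp only []
  have hk : ((PySem.Dict.ofList clu_dict : PySem.Dict String Int)).keys.Nodup :=
    PySem.Dict.nodup_keys_ofList _
  obtain ⟨keys, hkeys⟩ : ∃ K, (PySem.Dict.ofList clu_dict : PySem.Dict String Int).keys = K := ⟨_, rfl⟩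
  rw [hkeys] at hk ⊢
  have houter := PySem.Dict.items_foldl_insert_fresh (l := keys) (k := fun c_1 => c_1)
    (v := fun c_1 => keys.foldl (fun row c_2 =>
        if c_1 ≠ c_2 then
          if ((PySem.Dict.ofList (con_dict.map (fun p => (p.1, PySem.Dict.ofList p.2)))
              : PySem.Dict String (PySem.Dict String Int)).getD c_1 PySem.Dict.empty).contains c_2 then
            row.insert c_2 (((PySem.Dict.ofList (con_dict.map (fun p => (p.1, PySem.Dict.ofList p.2)))
              : PySem.Dict String (PySem.Dict String Int)).getD c_1 PySem.Dict.empty).getD c_2 0)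
          else
            row.insert c_2 0
        else row) PySem.Dict.empty)
    (d := PySem.Dict.empty) (by intro a _; rfl) (by simpa using hk)
  rw [houter]
  rw [show (PySem.Dict.empty : PySem.Dict String (PySem.Dict String Int)).items = [] from rfl]
  simp only [List.nil_append, List.map_map, Function.comp_def]
  apply List.map_congr_left
  intro c_1 _
  have := pv_row_eq keys hk c_1
    ((PySem.Dict.ofList (con_dict.map (fun p => (p.1, PySem.Dict.ofList p.2)))
        : PySem.Dict String (PySem.Dict String Int)).getD c_1 PySem.Dict.empty)
    (pv_cr_nodup con_dict c_1)
  rw [this]
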